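-- pv_equiv track=rewrite | github.com/02Andre/Ordis | chbot/__init__.py | __findBestId
-- ===== SOURCE A (Python) =====
-- def __minimumEditDistance(s1,s2):
--     if len(s1) > len(s2):
--         s1,s2 = s2,s1
--     distances = range(len(s1) + 1)
--     for index2,char2 in enumerate(s2):
--         newDistances = [index2+1]
--         for index1,char1 in enumerate(s1):
--             if char1 == char2:
--                 newDistances.append(distances[index1])
--             else:
--                 newDistances.append(1 + min((distances[index1],
--                                              distances[index1+1],
--                                              newDistances[-1])))
--         distances = newDistances
--     return distances[-1]
--
-- def __findBestId(s1,lst):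
--     rid=0
--     score=100000
--     for i in range(len(lst)):
--         tmpScore=__minimumEditDistance(s1,lst[i])
--         if tmpScore<score:
--             score=tmpScore
--             rid=i
--     return rid
-- ===== SOURCE B (Python) =====
-- def __editDistance(s1, s2):
--     memo = {}
--     get = memo.get
--     w = len(s2) + 1
--
--     def go(i, j):
--         if i == 0:
--             return j
--         if j == 0:
--             return i
--         key = i * w + j
--         r = get(key)
--         if r is None:
--             if s1[i - 1] == s2[j - 1]:
--                 r = go(i - 1, j - 1)
--             else:
--                 r = 1 + min(go(i - 1, j), go(i, j - 1), go(i - 1, j - 1))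
--             memo[key] = r
--         return r
--
--     return go(len(s1), len(s2))
--
--
-- def __findBestId(s1, lst):
--     rid = 0
--     score = 100000
--     cache = {}
--     for i, s2 in enumerate(lst):
--         tmpScore = cache.get(s2)
--         if tmpScore is None:
--             tmpScore = __editDistance(s1, s2)
--             cache[s2] = tmpScore
--         if tmpScore < score:
--             score = tmpScore
--             rid = i
--     return rid
-- ===== Notes on version B (the rewrite author's own statement) =====
-- stated objective: faster
-- what changed: The edit distance is recomputed by top-down memoized recursion over string prefixes (base cases return the remaining length, no len-swap) instead of A's bottom-up one-row iterative DP, and the index scan caches the distance of each distinct word in a dict so duplicate words are never recomputed.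
import Mathlib
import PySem

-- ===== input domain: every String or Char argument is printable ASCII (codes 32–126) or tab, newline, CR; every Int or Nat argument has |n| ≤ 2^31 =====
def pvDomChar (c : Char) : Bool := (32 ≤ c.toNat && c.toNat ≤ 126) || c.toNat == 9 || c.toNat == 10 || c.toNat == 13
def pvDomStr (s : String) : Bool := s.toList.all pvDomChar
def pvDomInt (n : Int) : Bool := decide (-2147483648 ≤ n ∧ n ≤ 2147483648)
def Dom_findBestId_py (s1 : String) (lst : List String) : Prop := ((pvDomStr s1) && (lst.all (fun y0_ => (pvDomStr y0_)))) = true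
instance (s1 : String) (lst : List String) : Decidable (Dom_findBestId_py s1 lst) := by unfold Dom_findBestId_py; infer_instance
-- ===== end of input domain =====

-- B replaces A's bottom-up one-row iterative edit-distance DP by top-down recursion over prefixes
-- (memoized in Python; the memo is an evaluation detail and does not change the value), and its scan
-- caches the distance per distinct word so duplicates are not recomputed: an alternative decomposition.

-- ===== PORT A =====
-- inner loop body of __minimumEditDistance (the 'for index1,char1 in enumerate(s1)' loop)
def innerBody (distances : List Int) (c2 : Char) (nd : List Int) (y : Int × Char) : List Int :=
  if y.2 = c2 then nd ++ [PySem.List.pyGetD distances y.1 0]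
  else nd ++ [1 + min (min (PySem.List.pyGetD distances y.1 0)
                           (PySem.List.pyGetD distances (y.1 + 1) 0))
                      (PySem.List.pyGetD nd (-1) 0)]

-- outer loop body of __minimumEditDistance (the 'for index2,char2 in enumerate(s2)' loop)
def outerBody (a : List Char) (distances : List Int) (x : Int × Char) : List Int :=
  (PySem.List.enumerate a).foldl (innerBody distances x.2) [x.1 + 1]

def medA (s1 s2 : String) : Int :=
  let l1 := s1.toList
  let l2 := s2.toList
  let a := if l1.length > l2.length then l2 else l1
  let b := if l1.length > l2.length then l1 else l2
  let final := (PySem.List.enumerate b).foldl (outerBody a)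
    (PySem.List.pyRange 0 ((a.length : Int) + 1) 1)
  PySem.List.pyGetD final (-1) 0

-- loop body of __findBestId: state (rid, score)
def pickA (s1 : String) (lst : List String) (st : Int × Int) (i : Int) : Int × Int :=
  let tmp := medA s1 (PySem.List.pyGetD lst i "")
  if tmp < st.2 then (i, tmp) else st

def findBestId_py (s1 : String) (lst : List String) : Int :=
  ((PySem.List.pyRange 0 (lst.length : Int) 1).foldl (pickA s1 lst) ((0 : Int), (100000 : Int))).1

-- ===== PORT B =====
-- go(i, j) of __editDistance: edit distance of s1[:i] and s2[:j] (the Python memo only caches these values)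
def edAlt (a b : List Char) (i j : Nat) : Int :=
  if hi : i = 0 then (j : Int)
  else if hj : j = 0 then (i : Int)
  else if a[i-1]? = b[j-1]? then edAlt a b (i-1) (j-1)
  else 1 + min (min (edAlt a b (i-1) j) (edAlt a b i (j-1))) (edAlt a b (i-1) (j-1))
termination_by i + j
decreasing_by all_goals omega

-- __editDistance of B: go(len(s1), len(s2))
def edB (s1 s2 : String) : Int :=
  edAlt s1.toList s2.toList s1.toList.length s2.toList.length

-- loop body of __findBestId in B: state ((rid, score), cache), iterating enumerate(lst);
-- the cache from word to its already-computed distance skips recomputation on duplicate words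
def pickB (s1 : String) (st : (Int × Int) × PySem.Dict String Int) (x : Int × String) :
    (Int × Int) × PySem.Dict String Int :=
  match st.2.get? x.2 with
  | some tmp => (if tmp < st.1.2 then (x.1, tmp) else st.1, st.2)
  | none =>
    let tmp := edB s1 x.2
    (if tmp < st.1.2 then (x.1, tmp) else st.1, st.2.insert x.2 tmp)

def findBestId_py_alt (s1 : String) (lst : List String) : Int :=
  ((PySem.List.enumerate lst).foldl (pickB s1)
    (((0 : Int), (100000 : Int)), PySem.Dict.empty)).1.1

-- ===== PRECONDITION & SPEC =====
def Spec_findBestId_py (s1 : String) (lst : List String) (out : Int) : Prop := out = findBestId_py_alt s1 lst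
instance (s1 : String) (lst : List String) (out : Int) : Decidable (Spec_findBestId_py s1 lst out) := by unfold Spec_findBestId_py; infer_instance

-- ===== CLAIM (what is proved, stated in full; the proofs are below) =====
def Claim_equal_findBestId_py : Prop := ∀ (s1 : String) (lst : List String), Dom_findBestId_py s1 lst → Spec_findBestId_py s1 lst (findBestId_py s1 lst)

-- ===== LEMMAS AND PROOFS =====

-- the DP row: distances after j outer steps, of length m
def row (a b : List Char) (j m : Nat) : List Int :=
  (List.range m).map (fun i => edAlt a b i j)

lemma edAlt_zero_left (a b : List Char) (j : Nat) : edAlt a b 0 j = (j : Int) := by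
  rw [edAlt]; simp

lemma edAlt_zero_right (a b : List Char) (i : Nat) : edAlt a b i 0 = (i : Int) := by
  rw [edAlt]; split <;> simp_all

lemma min3_rot (x y z : Int) : min (min x y) z = min (min z y) x := by omega

lemma edAlt_symm_aux (n : Nat) : ∀ (a b : List Char) (i j : Nat), i + j ≤ n →
    edAlt a b i j = edAlt b a j i := by
  induction n with
  | zero =>
    intro a b i j h
    have hi : i = 0 := by omega
    have hj : j = 0 := by omega
    subst hi; subst hj; rw [edAlt_zero_left, edAlt_zero_left]
  | succ n ih =>
    intro a b i j h
    by_cases hi : i = 0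
    · subst hi; rw [edAlt_zero_left, edAlt_zero_right]
    by_cases hj : j = 0
    · subst hj; rw [edAlt_zero_right, edAlt_zero_left]
    conv_lhs => rw [edAlt]
    conv_rhs => rw [edAlt]
    rw [dif_neg hi, dif_neg hj, dif_neg hj, dif_neg hi]
    by_cases hc : a[i-1]? = b[j-1]?
    · rw [if_pos hc, if_pos hc.symm]
      exact ih a b (i-1) (j-1) (by omega)
    · rw [if_neg hc, if_neg (fun h => hc h.symm)]
      rw [ih a b (i-1) j (by omega), ih a b i (j-1) (by omega), ih a b (i-1) (j-1) (by omega)]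
      rw [min_comm (edAlt b a j (i-1)) (edAlt b a (j-1) i)]

lemma edAlt_symm (a b : List Char) (i j : Nat) : edAlt a b i j = edAlt b a j i :=
  edAlt_symm_aux (i + j) a b i j le_rfl

lemma row_succ (a b : List Char) (j m : Nat) :
    row a b j (m + 1) = row a b j m ++ [edAlt a b m j] := by
  simp [row, List.range_succ]

-- one inner step extends the new row by the next cell
lemma inner_step (a b : List Char) (j k : Nat) (c2 : Char)
    (hk : k < a.length) (hc : b[j]? = some c2) :
    innerBody (row a b j (a.length + 1)) c2 (row a b (j+1) (k+1)) ((k : Int), a[k]) =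
      row a b (j+1) (k+2) := by
  have hget : ∀ (i j' : Nat), i < a.length + 1 →
      PySem.List.pyGetD (row a b j' (a.length + 1)) (i : Int) 0 = edAlt a b i j' := by
    intro i j' hi
    rw [PySem.List.pyGetD_natCast, row, PySem.List.getD_map_range _ _ _ _ hi]
  have hlast : PySem.List.pyGetD (row a b (j+1) (k+1)) (-1) 0 = edAlt a b k (j+1) := by
    rw [row_succ, PySem.List.pyGetD_neg_one_append_singleton]
  have hcell : edAlt a b (k+1) (j+1) =
      if a[k] = c2 then edAlt a b k j
      else 1 + min (min (edAlt a b k (j+1)) (edAlt a b (k+1) j)) (edAlt a b k j) := by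
    rw [edAlt]
    simp only [Nat.add_sub_cancel, dif_neg (Nat.succ_ne_zero k), dif_neg (Nat.succ_ne_zero j)]
    rw [List.getElem?_eq_getElem hk, hc]
    simp [Option.some.injEq]
  rw [show k + 2 = (k + 1) + 1 from rfl, row_succ a b (j+1) (k+1)]
  unfold innerBody
  simp only []
  by_cases hch : a[k] = c2
  · rw [if_pos hch, hget k j (by omega), hcell, if_pos hch]
  · rw [if_neg hch, hget k j (by omega)]
    rw [show ((k : Int) + 1) = ((k + 1 : Nat) : Int) by push_cast; ring]
    rw [hget (k+1) j (by omega), hlast, hcell, if_neg hch, min3_rot]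

-- running the inner fold from position k completes the new row
lemma inner_fold (a b : List Char) (j : Nat) (c2 : Char) (hc : b[j]? = some c2) :
    ∀ (n k : Nat), a.length - k = n → k ≤ a.length →
    (PySem.List.enumerate (a.drop k) (k : Int)).foldl
        (innerBody (row a b j (a.length + 1)) c2) (row a b (j+1) (k+1)) =
      row a b (j+1) (a.length + 1) := by
  intro n
  induction n with
  | zero =>
    intro k hn hk
    have : k = a.length := by omega
    subst this
    simp [List.drop_length, PySem.List.enumerate_nil]
  | succ n ih =>
    intro k hn hk
    have hklt : k < a.length := by omega
    rw [List.drop_eq_getElem_cons hklt, PySem.List.enumerate_cons, List.foldl_cons]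
    rw [inner_step a b j k c2 hklt hc]
    have := ih (k+1) (by omega) (by omega)
    rw [show ((k : Int) + 1) = ((k + 1 : Nat) : Int) by push_cast; ring]
    exact this

-- running the outer fold from position j yields the final row
lemma outer_fold (a b : List Char) : ∀ (n j : Nat), b.length - j = n → j ≤ b.length →
    (PySem.List.enumerate (b.drop j) (j : Int)).foldl (outerBody a) (row a b j (a.length + 1)) =
      row a b b.length (a.length + 1) := by
  intro n
  induction n with
  | zero =>
    intro j hn hj
    have : j = b.length := by omega
    subst this
    simp [List.drop_length, PySem.List.enumerate_nil]
  | succ n ih =>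
    intro j hn hj
    have hjlt : j < b.length := by omega
    rw [List.drop_eq_getElem_cons hjlt, PySem.List.enumerate_cons, List.foldl_cons]
    have hstep : outerBody a (row a b j (a.length + 1)) ((j : Int), b[j]) =
        row a b (j+1) (a.length + 1) := by
      unfold outerBody
      have hinit : row a b (j+1) 1 = [( (j : Int) + 1 )] := by
        simp [row, edAlt_zero_left]
      have hc : b[j]? = some b[j] := List.getElem?_eq_getElem hjlt
      have := inner_fold a b j b[j] hc a.length 0 (by omega) (by omega)
      simpa [← hinit] using this
    rw [hstep]
    have := ih (j+1) (by omega) (by omega)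
    rw [show ((j : Int) + 1) = ((j + 1 : Nat) : Int) by push_cast; ring]
    exact this

lemma row_init (a b : List Char) :
    PySem.List.pyRange 0 ((a.length : Int) + 1) 1 = row a b 0 (a.length + 1) := by
  rw [PySem.List.pyRange_one, row]
  have : (((a.length : Int) + 1 - 0)).toNat = a.length + 1 := by omega
  rw [this]
  apply List.map_congr_left
  intro i _
  rw [edAlt_zero_right]; ring

-- the DP of A computes edAlt on (a, b)
lemma dp_eq (a b : List Char) :
    PySem.List.pyGetD
        ((PySem.List.enumerate b).foldl (outerBody a)
          (PySem.List.pyRange 0 ((a.length : Int) + 1) 1)) (-1) 0 =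
      edAlt a b a.length b.length := by
  rw [row_init a b]
  have h0 : (PySem.List.enumerate (b.drop 0) ((0 : Nat) : Int)).foldl (outerBody a)
      (row a b 0 (a.length + 1)) = row a b b.length (a.length + 1) :=
    outer_fold a b b.length 0 (by omega) (by omega)
  simp only [List.drop_zero, Nat.cast_zero] at h0
  rw [h0, row_succ, PySem.List.pyGetD_neg_one_append_singleton]

lemma medA_eq (s1 s2 : String) :
    medA s1 s2 = edAlt s1.toList s2.toList s1.toList.length s2.toList.length := by
  unfold medA
  by_cases h : s1.toList.length > s2.toList.length
  · simp only [h, if_true]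
    rw [dp_eq, edAlt_symm]
  · simp only [h, if_false]
    rw [dp_eq]

-- A's scan equals B's cached scan: the cache only ever stores correct distances
lemma scan_eq (s1 : String) (lst : List String) :
    ∀ (n k : Nat), lst.length - k = n → k ≤ lst.length →
    ∀ (st : Int × Int) (c : PySem.Dict String Int),
    (∀ (w : String) (v : Int), c.get? w = some v → v = edB s1 w) →
    (PySem.List.pyRange (k : Int) (lst.length : Int) 1).foldl (pickA s1 lst) st =
      ((PySem.List.enumerate (lst.drop k) (k : Int)).foldl (pickB s1) (st, c)).1 := by
  intro n
  induction n with
  | zero =>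
    intro k hn hk st c _
    have : k = lst.length := by omega
    rw [PySem.List.pyRange_one_eq_nil (by omega), this, List.drop_length,
      PySem.List.enumerate_nil]
    rfl
  | succ n ih =>
    intro k hn hk st c hc
    have hklt : k < lst.length := by omega
    rw [PySem.List.pyRange_one_cons (by exact_mod_cast hklt),
      List.drop_eq_getElem_cons hklt, PySem.List.enumerate_cons,
      List.foldl_cons, List.foldl_cons]
    have hA : pickA s1 lst st (k : Int) =
        (if edB s1 lst[k] < st.2 then ((k : Int), edB s1 lst[k]) else st) := by
      unfold pickA
      rw [PySem.List.pyGetD_natCast, List.getD_eq_getElem?_getD,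
        List.getElem?_eq_getElem hklt, Option.getD_some, medA_eq, edB]
    rw [show ((k : Int) + 1) = ((k + 1 : Nat) : Int) by push_cast; ring]
    cases hget : c.get? lst[k] with
    | some v =>
      have hv : v = edB s1 lst[k] := hc _ _ hget
      have hB : pickB s1 (st, c) ((k : Int), lst[k]) =
          ((if edB s1 lst[k] < st.2 then ((k : Int), edB s1 lst[k]) else st), c) := by
        simp [pickB, hget, hv]
      rw [hA, hB]
      exact ih (k+1) (by omega) (by omega) _ c hc
    | none =>
      have hB : pickB s1 (st, c) ((k : Int), lst[k]) =
          ((if edB s1 lst[k] < st.2 then ((k : Int), edB s1 lst[k]) else st),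
            c.insert lst[k] (edB s1 lst[k])) := by
        simp [pickB, hget]
      rw [hA, hB]
      refine ih (k+1) (by omega) (by omega) _ _ ?_
      intro w v hw
      by_cases hwk : w = lst[k]
      · subst hwk
        rw [PySem.Dict.get?_insert_self] at hw
        cases hw; rfl
      · rw [PySem.Dict.get?_insert_of_ne _ _ hwk] at hw
        exact hc _ _ hw

-- ===== VERDICT (by name: the statement is the Claim_ definition above) =====
theorem findBestId_py_spec : Claim_equal_findBestId_py := by
  intro s1 lst _
  unfold Spec_findBestId_py findBestId_py findBestId_py_alt
  have := scan_eq s1 lst lst.length 0 (by omega) (by omega) ((0 : Int), (100000 : Int))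
    PySem.Dict.empty (fun w v hw => by rw [PySem.Dict.get?_empty] at hw; cases hw)
  simp only [Nat.cast_zero, List.drop_zero] at this
  rw [this]
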